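-- pv_equiv track=rewrite | github.com/TobikoData/sqlmesh | sqlmesh/core/snapshot/definition.py | _contiguous_intervals
-- ===== SOURCE A (Python) =====
-- import typing as t
--
-- Interval = t.Tuple[int, int]
--
-- Intervals = t.List[Interval]
--
-- def _contiguous_intervals(intervals: Intervals) -> t.List[Intervals]:
--     """Given a list of intervals with gaps, returns a list of sequences of contiguous intervals."""
--     contiguous_intervals = []
--     current_batch: t.List[Interval] = []
--     for interval in intervals:
--         if len(current_batch) == 0 or interval[0] == current_batch[-1][-1]:
--             current_batch.append(interval)
--         else:
--             contiguous_intervals.append(current_batch)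
--             current_batch = [interval]
--
--     if len(current_batch) > 0:
--         contiguous_intervals.append(current_batch)
--
--     return contiguous_intervals
-- ===== SOURCE B (Python) =====
-- import typing as t
--
-- Interval = t.Tuple[int, int]
--
-- Intervals = t.List[Interval]
--
-- def _contiguous_intervals(intervals: Intervals) -> t.List[Intervals]:
--     """Given a list of intervals with gaps, returns a list of sequences of contiguous intervals."""
--     if not intervals:
--         return []
--     cuts = [0] + [i for i in range(1, len(intervals)) if intervals[i][0] != intervals[i - 1][-1]] + [len(intervals)]
--     return [intervals[a:b] for a, b in zip(cuts, cuts[1:])]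
-- ===== Notes on version B (the rewrite author's own statement) =====
-- stated objective: alternative
-- what changed: Replaced the maintain-current-batch-and-flush accumulator loop with a two-phase find-boundaries-then-partition structure: first collect every index where contiguity breaks, then slice the input between consecutive cut points.
import Mathlib
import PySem

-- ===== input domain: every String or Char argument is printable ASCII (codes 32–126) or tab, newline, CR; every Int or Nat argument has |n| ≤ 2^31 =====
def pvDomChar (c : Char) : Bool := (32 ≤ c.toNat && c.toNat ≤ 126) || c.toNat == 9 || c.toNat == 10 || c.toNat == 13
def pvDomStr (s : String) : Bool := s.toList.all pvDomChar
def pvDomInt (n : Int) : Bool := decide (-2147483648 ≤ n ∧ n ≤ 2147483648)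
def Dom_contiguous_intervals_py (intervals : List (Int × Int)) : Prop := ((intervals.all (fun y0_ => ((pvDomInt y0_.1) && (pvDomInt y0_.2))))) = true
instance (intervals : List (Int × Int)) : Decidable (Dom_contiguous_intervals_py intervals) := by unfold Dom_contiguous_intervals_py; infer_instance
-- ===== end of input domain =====

-- B replaces A's single accumulator-and-flush pass by a boundaries-then-partition
-- two-phase structure (alternative decomposition, same cost).

-- ===== PORT A =====
-- loop body of A's for-loop: state = (contiguous_intervals, current_batch)
def pvAStep (s : List (List (Int × Int)) × List (Int × Int)) (interval : Int × Int) :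
    List (List (Int × Int)) × List (Int × Int) :=
  -- 'current_batch[-1][-1]': the default of getLastD is never used (length-0 test short-circuits)
  if s.2.length = 0 ∨ interval.1 = (s.2.getLastD (0, 0)).2 then
    (s.1, s.2 ++ [interval])
  else
    (s.1 ++ [s.2], [interval])

def contiguous_intervals_py (intervals : List (Int × Int)) : List (List (Int × Int)) :=
  let s := intervals.foldl pvAStep ([], [])
  if s.2.length > 0 then s.1 ++ [s.2] else s.1

-- ===== PORT B =====
-- 'intervals[i][0] != intervals[i - 1][-1]' (indices are always in range in B's use)
def pvBoundary (intervals : List (Int × Int)) (i : Int) : Bool :=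
  !((PySem.List.pyGetD intervals i (0, 0)).1 == (PySem.List.pyGetD intervals (i - 1) (0, 0)).2)

def contiguous_intervals_py_alt (intervals : List (Int × Int)) : List (List (Int × Int)) :=
  if intervals = [] then []
  else
    let cuts : List Int :=
      0 :: ((PySem.List.pyRange 1 (intervals.length : Int) 1).filter (pvBoundary intervals)
            ++ [(intervals.length : Int)])
    (cuts.zip cuts.tail).map (fun p => PySem.List.slice intervals (some p.1) (some p.2))

-- ===== PRECONDITION & SPEC =====
def Spec_contiguous_intervals_py (intervals : List (Int × Int)) (out : List (List (Int × Int))) : Prop := out = contiguous_intervals_py_alt intervals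
instance (intervals : List (Int × Int)) (out : List (List (Int × Int))) : Decidable (Spec_contiguous_intervals_py intervals out) := by unfold Spec_contiguous_intervals_py; infer_instance

-- ===== CLAIM (what is proved, stated in full; the proofs are below) =====
def Claim_equal_contiguous_intervals_py : Prop := ∀ (intervals : List (Int × Int)), Dom_contiguous_intervals_py intervals → Spec_contiguous_intervals_py intervals (contiguous_intervals_py intervals)

-- ===== LEMMAS AND PROOFS =====

-- prepend p to the first group (the empty case never occurs where it is used)
def pvConsHead (p : Int × Int) : List (List (Int × Int)) → List (List (Int × Int))
  | [] => [[p]]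
  | g :: gs => (p :: g) :: gs

def pvFinish (s : List (List (Int × Int)) × List (Int × Int)) : List (List (Int × Int)) :=
  if s.2.length > 0 then s.1 ++ [s.2] else s.1

theorem pvA_acc (xs : List (Int × Int)) :
    ∀ acc cur, pvFinish (xs.foldl pvAStep (acc, cur)) = acc ++ pvFinish (xs.foldl pvAStep ([], cur)) := by
  induction xs with
  | nil =>
    intro acc cur
    simp only [List.foldl_nil, pvFinish]
    split_ifs <;> simp
  | cons x xs ih =>
    intro acc cur
    simp only [List.foldl_cons, pvAStep]
    split_ifs with h
    · exact ih acc (cur ++ [x])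
    · simp only [List.nil_append]
      rw [ih (acc ++ [cur]) [x], ih [cur] [x]]
      simp

theorem pvA_prepend (xs : List (Int × Int)) :
    ∀ cur p, cur ≠ [] →
      pvFinish (xs.foldl pvAStep ([], p :: cur)) = pvConsHead p (pvFinish (xs.foldl pvAStep ([], cur))) := by
  induction xs with
  | nil =>
    intro cur p hcur
    obtain ⟨c, cs, rfl⟩ := List.exists_cons_of_ne_nil hcur
    simp [pvFinish, pvConsHead]
  | cons x xs ih =>
    intro cur p hcur
    obtain ⟨c, cs, rfl⟩ := List.exists_cons_of_ne_nil hcur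
    simp only [List.foldl_cons, pvAStep, List.length_cons, List.getLastD_cons]
    split_ifs with h₁ h₂ h₂
    · simpa using ih (c :: cs ++ [x]) p (by simp)
    · exact absurd (by simpa using h₁) h₂
    · exact absurd (by simpa using h₂) h₁
    · simp only [List.nil_append]
      rw [pvA_acc xs [p :: c :: cs] [x], pvA_acc xs [c :: cs] [x]]
      simp [pvConsHead]

theorem pvA_cons (x y : Int × Int) (ys : List (Int × Int)) :
    contiguous_intervals_py (x :: y :: ys) =
      if y.1 = x.2 then pvConsHead x (contiguous_intervals_py (y :: ys))
      else [x] :: contiguous_intervals_py (y :: ys) := by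
  have hA : ∀ zs, contiguous_intervals_py zs = pvFinish (zs.foldl pvAStep ([], [])) := fun _ => rfl
  rw [hA, hA]
  have h2 : (y :: ys).foldl pvAStep ([], []) = ys.foldl pvAStep ([], [y]) := by
    simp [pvAStep]
  by_cases h : y.1 = x.2
  · rw [if_pos h]
    have h1 : (x :: y :: ys).foldl pvAStep ([], []) = ys.foldl pvAStep ([], [x, y]) := by
      simp [pvAStep, h]
    rw [h1, h2]
    exact pvA_prepend ys [y] x (by simp)
  · rw [if_neg h]
    have h1 : (x :: y :: ys).foldl pvAStep ([], []) = ys.foldl pvAStep ([[x]], [y]) := by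
      simp [pvAStep, h]
    rw [h1, h2, pvA_acc]
    simp

theorem pvA_single (x : Int × Int) : contiguous_intervals_py [x] = [[x]] := by
  simp [contiguous_intervals_py, pvAStep]

theorem pvB_single (x : Int × Int) : contiguous_intervals_py_alt [x] = [[x]] := by
  simp [contiguous_intervals_py_alt, PySem.List.pyRange_one_eq_nil (le_refl (1:Int)),
    PySem.List.slice]

theorem pvBoundary_one (x y : Int × Int) (ys : List (Int × Int)) :
    pvBoundary (x :: y :: ys) 1 = !(y.1 == x.2) := by
  have h0 : (1 : Int) - 1 = ((0 : Nat) : Int) := by norm_num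
  have h1 : (1 : Int) = ((1 : Nat) : Int) := by norm_num
  unfold pvBoundary
  rw [h0, h1, PySem.List.pyGetD_natCast, PySem.List.pyGetD_natCast]
  simp [List.getD]

theorem pvBoundary_shift (x : Int × Int) (xs : List (Int × Int)) (k : Nat) :
    pvBoundary (x :: xs) (2 + (k : Int)) = pvBoundary xs (1 + (k : Int)) := by
  have e2 : (2 + (k : Int)) - 1 = ((k + 1 : Nat) : Int) := by push_cast; ring
  have e1 : (2 + (k : Int)) = ((k + 2 : Nat) : Int) := by push_cast; ring
  have e4 : (1 + (k : Int)) - 1 = ((k : Nat) : Int) := by omega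
  have e3 : (1 + (k : Int)) = ((k + 1 : Nat) : Int) := by push_cast; ring
  unfold pvBoundary
  rw [e2, e1, e4, e3]
  rw [PySem.List.pyGetD_natCast, PySem.List.pyGetD_natCast, PySem.List.pyGetD_natCast,
    PySem.List.pyGetD_natCast]
  have g1 : (x :: xs).getD (k + 2) (0, 0) = xs.getD (k + 1) (0, 0) := by
    show (x :: xs).getD ((k + 1) + 1) (0, 0) = _
    exact List.getD_cons_succ
  have g2 : (x :: xs).getD (k + 1) (0, 0) = xs.getD k (0, 0) := List.getD_cons_succ
  rw [g1, g2]

theorem pvFilter_shift (x : Int × Int) (xs : List (Int × Int)) :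
    (PySem.List.pyRange 2 ((xs.length : Int) + 1) 1).filter (pvBoundary (x :: xs)) =
      ((PySem.List.pyRange 1 (xs.length : Int) 1).filter (pvBoundary xs)).map (· + 1) := by
  rw [PySem.List.pyRange_one, PySem.List.pyRange_one]
  have he : ((xs.length : Int) + 1 - 2).toNat = ((xs.length : Int) - 1).toNat := by omega
  rw [he, List.filter_map, List.filter_map, List.map_map]
  have hp : ∀ k ∈ List.range ((xs.length : Int) - 1).toNat,
      (pvBoundary (x :: xs) ∘ fun k : Nat => 2 + (k : Int)) k
        = (pvBoundary xs ∘ fun k : Nat => 1 + (k : Int)) k := by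
    intro k _
    exact pvBoundary_shift x xs k
  rw [List.filter_congr hp]
  apply List.map_congr_left
  intro k _
  simp only [Function.comp]
  ring

theorem pvSlice_shift (x : Int × Int) (xs : List (Int × Int)) (a b : Int) (ha : 0 ≤ a) (hb : 0 ≤ b) :
    PySem.List.slice (x :: xs) (some (a + 1)) (some (b + 1)) = PySem.List.slice xs (some a) (some b) := by
  rw [PySem.List.slice_toNat (x :: xs) (by omega) (by omega), PySem.List.slice_toNat xs ha hb]
  have h2 : (b + 1).toNat - (a.toNat + 1) = b.toNat - a.toNat := by omega
  rw [(by omega : (a + 1).toNat = a.toNat + 1), h2, List.drop_succ_cons]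

theorem pvSlice_zero (x : Int × Int) (xs : List (Int × Int)) (b : Int) (hb : 0 ≤ b) :
    PySem.List.slice (x :: xs) (some 0) (some (b + 1)) = x :: PySem.List.slice xs (some 0) (some b) := by
  rw [PySem.List.slice_toNat (x :: xs) (by omega) (by omega), PySem.List.slice_toNat xs le_rfl hb]
  have h1 : (b + 1).toNat - (0 : Int).toNat = (b.toNat - (0 : Int).toNat) + 1 := by omega
  rw [h1]
  simp

theorem pvSlices_shift (x : Int × Int) (xs : List (Int × Int)) (cts : List Int) (h : ∀ c ∈ cts, 0 ≤ c) :
    ((cts.map (· + 1)).zip (cts.map (· + 1)).tail).map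
        (fun p => PySem.List.slice (x :: xs) (some p.1) (some p.2)) =
      (cts.zip cts.tail).map (fun p => PySem.List.slice xs (some p.1) (some p.2)) := by
  rw [← List.map_tail, List.zip_map, List.map_map]
  apply List.map_congr_left
  intro p hp
  have h1 : 0 ≤ p.1 := h p.1 (List.of_mem_zip hp).1
  have h2 : 0 ≤ p.2 := h p.2 (List.mem_of_mem_tail (List.of_mem_zip hp).2)
  simp only [Function.comp, Prod.map]
  exact pvSlice_shift x xs p.1 p.2 h1 h2

theorem pvB_char (zs : List (Int × Int)) (hz : zs ≠ []) :
    contiguous_intervals_py_alt zs =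
      ((0 :: ((PySem.List.pyRange 1 (zs.length : Int) 1).filter (pvBoundary zs) ++ [(zs.length : Int)])).zip
          ((PySem.List.pyRange 1 (zs.length : Int) 1).filter (pvBoundary zs) ++ [(zs.length : Int)])).map
        (fun p => PySem.List.slice zs (some p.1) (some p.2)) := by
  simp [contiguous_intervals_py_alt, hz]

theorem pvB_cons (x y : Int × Int) (ys : List (Int × Int)) :
    contiguous_intervals_py_alt (x :: y :: ys) =
      if y.1 = x.2 then pvConsHead x (contiguous_intervals_py_alt (y :: ys))
      else [x] :: contiguous_intervals_py_alt (y :: ys) := by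
  have hm1 : (1 : Int) ≤ ((y :: ys).length : Int) := by simp
  have hlen : ((x :: y :: ys).length : Int) = ((y :: ys).length : Int) + 1 := by
    push_cast [List.length_cons]; ring
  rw [pvB_char (x :: y :: ys) (by simp), pvB_char (y :: ys) (by simp), hlen,
    PySem.List.pyRange_one_cons (by omega), (by norm_num : (1 : Int) + 1 = 2),
    List.filter_cons, pvBoundary_one, pvFilter_shift x (y :: ys)]
  set bxs := (PySem.List.pyRange 1 ((y :: ys).length : Int) 1).filter (pvBoundary (y :: ys)) with hbxs
  have hbnn : ∀ c ∈ bxs ++ [((y :: ys).length : Int)], 0 ≤ c := by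
    intro c hc
    rcases List.mem_append.1 hc with hc | hc
    · have := PySem.List.mem_pyRange_one.1 (List.mem_of_mem_filter hc)
      omega
    · simp only [List.mem_singleton] at hc
      omega
  have hmapct : bxs.map (· + 1) ++ [((y :: ys).length : Int) + 1]
      = (bxs ++ [((y :: ys).length : Int)]).map (· + 1) := by simp
  by_cases h : y.1 = x.2
  · rw [if_pos h, (by simp [h] : (!(y.1 == x.2)) = false)]
    simp only [Bool.false_eq_true, if_false]
    obtain ⟨c0, ctt, hct⟩ := List.exists_cons_of_ne_nil
      (show bxs ++ [((y :: ys).length : Int)] ≠ [] from by simp)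
    have hc0 : 0 ≤ c0 := hbnn c0 (by rw [hct]; exact List.mem_cons_self ..)
    have hss := pvSlices_shift x (y :: ys) (c0 :: ctt) (by rw [← hct]; exact hbnn)
    simp only [List.map_cons, List.tail_cons] at hss
    rw [hmapct, hct]
    simp only [List.map_cons, List.zip_cons_cons]
    rw [hss, pvSlice_zero x (y :: ys) c0 hc0]
    simp [pvConsHead]
  · rw [if_neg h, (by simp [h] : (!(y.1 == x.2)) = true)]
    simp only [if_true]
    have hss := pvSlices_shift x (y :: ys) (0 :: (bxs ++ [((y :: ys).length : Int)]))
      (by intro c hc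
          rcases List.mem_cons.1 hc with rfl | hc
          · exact le_rfl
          · exact hbnn c hc)
    simp only [List.map_cons, List.tail_cons] at hss
    rw [(by norm_num : (0 : Int) + 1 = 1)] at hss
    have h01 : PySem.List.slice (x :: y :: ys) (some 0) (some 1) = [x] := by
      have h00 := pvSlice_zero x (y :: ys) 0 le_rfl
      rw [PySem.List.slice_toNat (y :: ys) le_rfl le_rfl] at h00
      norm_num at h00
      exact h00
    rw [List.cons_append, hmapct]
    simp only [List.zip_cons_cons, List.map_cons]
    rw [hss, h01]

-- ===== VERDICT (by name: the statement is the Claim_ definition above) =====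
theorem pvAB_eq : ∀ intervals, contiguous_intervals_py intervals = contiguous_intervals_py_alt intervals := by
  intro intervals
  induction intervals with
  | nil => rfl
  | cons x xs ih =>
    cases xs with
    | nil => rw [pvA_single, pvB_single]
    | cons y ys =>
      rw [pvA_cons, pvB_cons, ih]

theorem contiguous_intervals_py_spec : Claim_equal_contiguous_intervals_py := by
  intro intervals _
  exact pvAB_eq intervals
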